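-- pv_equiv track=rewrite | github.com/ContextLab/CDL-bibliography | bibcheck/helpers.py | get_key_suffixes
-- ===== SOURCE A (Python) =====
-- from string import ascii_lowercase
-- import itertools
--
-- def get_key_suffixes(n):
--     """
--     return a list of suffixes to append to keys with the same base:
--     a, b, c, ..., z, aa, ab, ..., az, ba, ..., bz, aaa, aab, ...
--     """
--     # source: https://stackoverflow.com/questions/29351492/how-to-make-a-continuous-alphabetic-list-python-from-a-z-then-from-aa-ab-ac-e/29351603
--     if n <= 1:
--         return ""
--
--     def generate_id():
--         i = 1
--         while True:
--             for s in itertools.product(ascii_lowercase, repeat=i):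
--                 yield "".join(s)
--             i += 1
--
--     gen = generate_id()
--
--     def helper():
--         for s in gen:
--             return s
--
--     return [helper() for i in range(n)]
-- ===== SOURCE B (Python) =====
-- from string import ascii_lowercase
--
-- def get_key_suffixes(n):
--     """
--     return a list of suffixes to append to keys with the same base:
--     a, b, c, ..., z, aa, ab, ..., az, ba, ..., bz, aaa, aab, ...
--     """
--     if n <= 1:
--         return ""
--
--     def to_suffix(k):
--         # bijective base-26: 1 -> 'a', 26 -> 'z', 27 -> 'aa', ...
--         s = ""
--         while k:
--             k, r = divmod(k - 1, 26)
--             s = ascii_lowercase[r] + s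
--         return s
--
--     return [to_suffix(i) for i in range(1, n + 1)]
-- ===== Notes on version B (the rewrite author's own statement) =====
-- stated objective: idiomatic
-- what changed: Replaced the itertools.product generator machinery (enumerating all suffixes of length 1,2,... and pulling n of them) with a closed-form bijective base-26 conversion computing the i-th suffix directly by repeated divmod(k-1,26). Pre_ excludes n <= 1, where A returns the string "" instead of a list of strings (not a value of the declared List String return type); B does the same there.
-- outside the precondition, e.g. on get_key_suffixes(1): A returns '', B returns ''; on get_key_suffixes(0): A returns '', B returns ''
import Mathlib
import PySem

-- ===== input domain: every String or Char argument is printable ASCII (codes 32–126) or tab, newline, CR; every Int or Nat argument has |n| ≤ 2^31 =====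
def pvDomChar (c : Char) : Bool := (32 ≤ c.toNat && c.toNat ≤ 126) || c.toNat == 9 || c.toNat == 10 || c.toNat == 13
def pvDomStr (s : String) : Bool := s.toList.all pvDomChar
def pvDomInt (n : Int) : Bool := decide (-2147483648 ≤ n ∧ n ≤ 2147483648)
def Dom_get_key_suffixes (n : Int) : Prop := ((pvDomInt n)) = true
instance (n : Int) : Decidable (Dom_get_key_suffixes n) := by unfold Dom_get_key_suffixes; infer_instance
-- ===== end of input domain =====

-- B replaces A's itertools.product generator enumeration with a closed-form
-- bijective base-26 conversion per index (idiomatic; same result, no generator state).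


-- ===== PORT A =====
-- ascii_lowercase
def pyLetters : List Char :=
  ['a','b','c','d','e','f','g','h','i','j','k','l','m',
   'n','o','p','q','r','s','t','u','v','w','x','y','z']

-- itertools.product(ascii_lowercase, repeat=i), each tuple as a list of chars,
-- in product order (leftmost position varies slowest)
def prodTuples : Nat → List (List Char)
  | 0 => [[]]
  | i + 1 => pyLetters.flatMap (fun c => (prodTuples i).map (fun t => c :: t))

-- the generator: yield the joined products of length i, then of length i+1, ...;
-- pulling stops as soon as k values have been produced (the lazy generator is
-- never advanced past that).  fuel bounds the number of length-blocks visited;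
-- every block yields ≥ 26 ≥ 1 strings, so fuel = n blocks always suffice.
def genFrom : Nat → Nat → Nat → List String
  | 0, _, _ => []
  | fuel + 1, i, k =>
      let blk := (prodTuples i).map (fun t => String.ofList t)
      if k ≤ blk.length then blk.take k
      else blk ++ genFrom fuel (i + 1) (k - blk.length)

def get_key_suffixes (n : Int) : List String :=
  if n ≤ 1 then []
  else genFrom n.toNat 1 n.toNat

-- ===== PORT B =====
-- bijective base-26: 1 -> "a", 26 -> "z", 27 -> "aa", ...; peels the least
-- significant digit with divmod(k-1, 26) exactly as Source B's while-loop does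
-- (Source B prepends each char, i.e. earlier-peeled digits end up last)
def toSuffixChars : Nat → List Char
  | 0 => []
  | k + 1 => toSuffixChars (k / 26) ++ [Char.ofNat (97 + k % 26)]
  decreasing_by exact Nat.lt_succ_of_le (Nat.div_le_self _ _)

def get_key_suffixes_alt (n : Int) : List String :=
  if n ≤ 1 then []
  else (List.range n.toNat).map (fun i => String.ofList (toSuffixChars (i + 1)))

-- ===== PRECONDITION & SPEC =====
-- Pre_ excludes n ≤ 1, where the Python A returns the string "" instead of a
-- list of strings — not a value of the declared List String return type.
def Pre_get_key_suffixes (n : Int) : Prop := 2 ≤ n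
instance (n : Int) : Decidable (Pre_get_key_suffixes n) := by unfold Pre_get_key_suffixes; infer_instance
def pvWitness_get_key_suffixes : Int := (5)

def Spec_get_key_suffixes (n : Int) (out : List String) : Prop := out = get_key_suffixes_alt n
instance (n : Int) (out : List String) : Decidable (Spec_get_key_suffixes n out) := by unfold Spec_get_key_suffixes; infer_instance

-- ===== CLAIM (what is proved, stated in full; the proofs are below) =====
def Claim_equal_get_key_suffixes : Prop := ∀ (n : Int), Dom_get_key_suffixes n → Pre_get_key_suffixes n → Spec_get_key_suffixes n (get_key_suffixes n)

-- ===== LEMMAS AND PROOFS =====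

-- S26 m = number of suffixes of length ≤ m (= Σ_{i=1..m} 26^i, in closed recursion)
def S26 : Nat → Nat
  | 0 => 0
  | m + 1 => 26 * (S26 m + 1)

-- fixed-width base-26 representation, least significant digit last
def baseRep : Nat → Nat → List Char
  | 0, _ => []
  | i + 1, j => baseRep i (j / 26) ++ [Char.ofNat (97 + j % 26)]

lemma S26_closed (m : Nat) : 25 * S26 m + 26 = 26 ^ (m + 1) := by
  induction m with
  | zero => decide
  | succ m ih =>
      show 25 * (26 * (S26 m + 1)) + 26 = 26 ^ (m + 2)
      rw [pow_succ 26 (m + 1), ← ih]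
      ring

lemma S26_succ_eq (m : Nat) : S26 (m + 1) = S26 m + 26 ^ (m + 1) := by
  have h := S26_closed m
  show 26 * (S26 m + 1) = S26 m + 26 ^ (m + 1)
  omega

lemma le_S26 (n : Nat) : n ≤ S26 n := by
  induction n with
  | zero => exact Nat.le_refl 0
  | succ n ih => show n + 1 ≤ 26 * (S26 n + 1); omega

lemma toSuffix_baseRep : ∀ i j, j < 26 ^ (i + 1) →
    toSuffixChars (S26 i + j + 1) = baseRep (i + 1) j := by
  intro i
  induction i with
  | zero =>
      intro j hj
      have hj' : j < 26 := by simpa using hj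
      have h0 : S26 0 + j + 1 = j + 1 := by simp [S26]
      rw [h0]
      rw [toSuffixChars, baseRep, baseRep]
      rw [Nat.div_eq_of_lt hj', toSuffixChars]
  | succ i ih =>
      intro j hj
      have h1 : S26 (i + 1) + j + 1 = (26 * (S26 i + 1) + j) + 1 := rfl
      rw [h1, toSuffixChars]
      have hd : (26 * (S26 i + 1) + j) / 26 = S26 i + (j / 26) + 1 := by omega
      have hm : (26 * (S26 i + 1) + j) % 26 = j % 26 := by omega
      rw [hd, hm]
      have hjd : j / 26 < 26 ^ (i + 1) := by
        have : j < 26 ^ (i + 1) * 26 := by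
          calc j < 26 ^ (i + 2) := hj
          _ = 26 ^ (i + 1) * 26 := by rw [pow_succ]
        exact Nat.div_lt_of_lt_mul (by omega)
      rw [ih (j / 26) hjd]
      rfl

lemma baseRep_split : ∀ i d j, d < 26 → j < 26 ^ i →
    baseRep (i + 1) (d * 26 ^ i + j) = Char.ofNat (97 + d) :: baseRep i j := by
  intro i
  induction i with
  | zero =>
      intro d j hd hj
      have hj0 : j = 0 := by omega
      subst hj0
      show baseRep 1 (d * 1 + 0) = Char.ofNat (97 + d) :: baseRep 0 0
      rw [baseRep, baseRep, baseRep]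
      simp [Nat.mod_eq_of_lt hd]
  | succ i ih =>
      intro d j hd hj
      have hx : d * 26 ^ (i + 1) + j = 26 * (d * 26 ^ i) + j := by
        rw [pow_succ]; ring
      rw [baseRep, hx]
      have hjlt : j < 26 ^ i * 26 := by
        calc j < 26 ^ (i + 1) := hj
        _ = 26 ^ i * 26 := by rw [pow_succ]
      have hdv : (26 * (d * 26 ^ i) + j) / 26 = d * 26 ^ i + j / 26 := by
        rw [Nat.mul_add_div (by omega)]
      have hmd : (26 * (d * 26 ^ i) + j) % 26 = j % 26 := by
        rw [Nat.mul_add_mod]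
      rw [hdv, hmd, ih d (j / 26) hd (Nat.div_lt_of_lt_mul (by omega))]
      rfl

lemma range_mul_flatMap (a b : Nat) :
    List.range (a * b) = (List.range a).flatMap (fun d => (List.range b).map (fun j => d * b + j)) := by
  induction a with
  | zero => simp
  | succ a ih =>
      have h1 : (a + 1) * b = a * b + b := by ring
      rw [h1, List.range_add, ih, List.range_succ]
      simp [List.flatMap_append]

lemma pyLetters_eq : pyLetters = (List.range 26).map (fun d => Char.ofNat (97 + d)) := by
  decide

lemma prodTuples_eq : ∀ i, prodTuples i = (List.range (26 ^ i)).map (baseRep i) := by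
  intro i
  induction i with
  | zero => decide
  | succ i ih =>
      rw [prodTuples, ih, pyLetters_eq, pow_succ']
      rw [range_mul_flatMap 26 (26 ^ i)]
      rw [List.flatMap_map, List.map_flatMap]
      apply List.flatMap_congr
      intro d hd
      have hd26 : d < 26 := List.mem_range.mp hd
      rw [List.map_map, List.map_map]
      apply List.map_congr_left
      intro j hj
      have hj' : j < 26 ^ i := List.mem_range.mp hj
      simp only [Function.comp]
      rw [baseRep_split i d j hd26 hj']

lemma genFrom_eq : ∀ fuel i k,
    genFrom fuel i k
      = (((List.range fuel).map (· + i)).flatMap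
          (fun j => (prodTuples j).map (fun t => String.ofList t))).take k := by
  intro fuel
  induction fuel with
  | zero => intro i k; simp [genFrom]
  | succ fuel ih =>
      intro i k
      have hr : (List.range (fuel + 1)).map (· + i)
          = i :: (List.range fuel).map (· + (i + 1)) := by
        rw [List.range_succ_eq_map, List.map_cons, List.map_map]
        congr 1
        · omega
        · apply List.map_congr_left; intro a _; simp [Nat.succ_eq_add_one]; omega
      rw [genFrom, hr, List.flatMap_cons]
      by_cases h : k ≤ ((prodTuples i).map (fun t => String.ofList t)).length
      · rw [if_pos h, List.take_append_of_le_length h]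
      · rw [if_neg h, ih]
        rw [List.take_append]
        congr 1
        exact (List.take_of_length_le (by omega)).symm

lemma blocks_eq : ∀ m,
    ((List.range m).map (· + 1)).flatMap (fun i => (prodTuples i).map (fun t => String.ofList t))
      = (List.range (S26 m)).map (fun k => String.ofList (toSuffixChars (k + 1))) := by
  intro m
  induction m with
  | zero => decide
  | succ m ih =>
      rw [List.range_succ, List.map_append, List.flatMap_append, ih]
      rw [S26_succ_eq, List.range_add, List.map_append]
      congr 1
      simp only [List.map_cons, List.map_nil, List.flatMap_cons, List.flatMap_nil,
        List.append_nil]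
      rw [prodTuples_eq, List.map_map, List.map_map]
      apply List.map_congr_left
      intro j hj
      have hj' : j < 26 ^ (m + 1) := List.mem_range.mp hj
      simp only [Function.comp]
      rw [← toSuffix_baseRep m j hj']

-- ===== VERDICT (by name: the statement is the Claim_ definition above) =====
theorem get_key_suffixes_spec : Claim_equal_get_key_suffixes := by
  intro n _ hpre
  unfold Spec_get_key_suffixes get_key_suffixes get_key_suffixes_alt
  have hn : ¬ n ≤ 1 := by unfold Pre_get_key_suffixes at hpre; omega
  rw [if_neg hn, if_neg hn, genFrom_eq, blocks_eq]
  rw [← List.map_take, List.take_range]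
  rw [Nat.min_eq_left (le_S26 n.toNat)]
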